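-- pv_equiv track=rewrite | github.com/chlcken2/python-morph-analysis | word_to_ko210727.py | header_point_idx
-- ===== SOURCE A (Python) =====
-- def header_point_idx(whole_list, last_idx):
--     modified_result = []
--     for idx in range(len(whole_list)):
--         if idx <= last_idx:  # first_idx = 1
--             modified_result.append('')
--         else:
--             modified_result.append(whole_list[idx].strip())
--     return modified_result
-- ===== SOURCE B (Python) =====
-- def header_point_idx(whole_list, last_idx):
--     # Two-phase consumption of one shared iterator: a countdown loop emits
--     # blanks until the counter runs out (or the iterator is exhausted), then a
--     # plain loop strips whatever remains. No index, no per-element comparison.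
--     it = iter(whole_list)
--     out = []
--     blanks = last_idx + 1
--     while blanks > 0:
--         try:
--             next(it)
--         except StopIteration:
--             return out
--         out.append('')
--         blanks -= 1
--     for x in it:
--         out.append(x.strip())
--     return out
-- ===== Notes on version B (the rewrite author's own statement) =====
-- stated objective: alternative
-- what changed: Replaces the indexed loop with its per-element idx <= last_idx branch by two-phase consumption of a single shared iterator: a countdown while-loop emits blanks until the counter or the iterator is exhausted, then a homogeneous loop strips the remaining elements.
import Mathlib
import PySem

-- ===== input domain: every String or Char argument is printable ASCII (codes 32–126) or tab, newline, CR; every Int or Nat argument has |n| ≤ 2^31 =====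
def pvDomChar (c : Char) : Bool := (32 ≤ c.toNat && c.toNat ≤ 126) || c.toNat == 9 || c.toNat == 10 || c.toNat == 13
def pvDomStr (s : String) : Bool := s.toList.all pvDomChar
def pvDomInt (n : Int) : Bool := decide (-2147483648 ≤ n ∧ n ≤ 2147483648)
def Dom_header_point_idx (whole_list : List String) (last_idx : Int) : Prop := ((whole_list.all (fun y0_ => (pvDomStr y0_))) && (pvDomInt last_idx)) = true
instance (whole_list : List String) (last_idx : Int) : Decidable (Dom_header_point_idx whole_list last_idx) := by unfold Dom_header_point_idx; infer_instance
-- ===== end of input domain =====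

-- B consumes one shared iterator in two phases (countdown blanks, then strip the rest) instead of A's indexed loop with a per-element comparison; same values, different decomposition.
-- ===== PORT A =====
def header_point_idx (whole_list : List String) (last_idx : Int) : List String :=
  (PySem.List.pyRange 0 (whole_list.length : Int) 1).foldl
    (fun acc idx =>
      if idx ≤ last_idx then acc ++ [""]
      else acc ++ [PySem.Str.strip (PySem.List.pyGetD whole_list idx "")]) []

-- ===== PORT B =====
-- the iterator is the not-yet-consumed suffix `it`; `next` raising StopIteration is `it = []`
def hpiGo (it : List String) (out : List String) (blanks : Int) : List String :=
  if blanks > 0 then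
    match it with
    | [] => out                                   -- StopIteration: return out
    | _ :: rest => hpiGo rest (out ++ [""]) (blanks - 1)
  else
    it.foldl (fun acc x => acc ++ [PySem.Str.strip x]) out   -- the for-loop over the rest

def header_point_idx_alt (whole_list : List String) (last_idx : Int) : List String :=
  hpiGo whole_list [] (last_idx + 1)

-- ===== PRECONDITION & SPEC =====
def Spec_header_point_idx (whole_list : List String) (last_idx : Int) (out : List String) : Prop := out = header_point_idx_alt whole_list last_idx
instance (whole_list : List String) (last_idx : Int) (out : List String) : Decidable (Spec_header_point_idx whole_list last_idx out) := by unfold Spec_header_point_idx; infer_instance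

-- ===== CLAIM (what is proved, stated in full; the proofs are below) =====
def Claim_equal_header_point_idx : Prop := ∀ (whole_list : List String) (last_idx : Int), Dom_header_point_idx whole_list last_idx → Spec_header_point_idx whole_list last_idx (header_point_idx whole_list last_idx)

-- ===== LEMMAS AND PROOFS =====

-- common normal form both programs reach: a clamped blank prefix followed by the stripped tail
def hpiMid (wl : List String) (b : Int) : List String :=
  List.replicate (max 0 (min b (wl.length : Int))).toNat "" ++
    (wl.drop (max 0 (min b (wl.length : Int))).toNat).map PySem.Str.strip

theorem hpi_foldl_snoc {α β : Type} (g : α → β) :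
    ∀ (l : List α) (init : List β),
      l.foldl (fun acc x => acc ++ [g x]) init = init ++ l.map g := by
  intro l
  induction l with
  | nil => simp
  | cons x xs ih => intro init; simp [List.foldl, ih]

theorem hpiGo_eq_mid : ∀ (it out : List String) (b : Int),
    hpiGo it out b = out ++ hpiMid it b := by
  intro it
  induction it with
  | nil =>
      intro out b
      rw [hpiGo]
      have h0 : (max 0 (min b (0:Int))).toNat = 0 := by omega
      split
      · simp only [hpiMid, List.length_nil, Int.natCast_zero, h0, List.replicate_zero,
          List.drop_zero, List.map_nil, List.append_nil]
      · simp [hpiMid]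
  | cons x rest ih =>
      intro out b
      rw [hpiGo]
      split
      · next hb =>
        rw [ih]
        have key : hpiMid (x :: rest) b = "" :: hpiMid rest (b - 1) := by
          unfold hpiMid
          have hc : (max 0 (min b (((x :: rest)).length : Int))).toNat =
              (max 0 (min (b - 1) ((rest).length : Int))).toNat + 1 := by
            simp; omega
          rw [hc]
          simp [List.replicate_succ]
        rw [key]
        simp
      · next hb =>
        have key : hpiMid (x :: rest) b = (x :: rest).map PySem.Str.strip := by
          unfold hpiMid
          have hc : (max 0 (min b (((x :: rest)).length : Int))).toNat = 0 := by
            simp; omega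
          rw [hc]
          simp
        rw [hpi_foldl_snoc, key]

theorem hpiA_eq_mid (wl : List String) (li : Int) :
    header_point_idx wl li = hpiMid wl (li + 1) := by
  unfold header_point_idx hpiMid
  set n : Int := (wl.length : Int) with hn
  set c : Int := max 0 (min (li + 1) n) with hc
  have h0c : (0:Int) ≤ c := le_max_left _ _
  have hcn : c ≤ n := by simp only [hc, hn]; omega
  have hsplit : PySem.List.pyRange 0 n 1 =
      PySem.List.pyRange 0 c 1 ++ PySem.List.pyRange c n 1 :=
    PySem.List.pyRange_one_append 0 c n h0c hcn
  have hstep : ∀ (acc : List String) (idx : Int),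
      (if idx ≤ li then acc ++ [""]
       else acc ++ [PySem.Str.strip (PySem.List.pyGetD wl idx "")]) =
      acc ++ [if idx ≤ li then "" else PySem.Str.strip (PySem.List.pyGetD wl idx "")] := by
    intro acc idx; split <;> rfl
  calc (PySem.List.pyRange 0 n 1).foldl
        (fun acc idx =>
          if idx ≤ li then acc ++ [""]
          else acc ++ [PySem.Str.strip (PySem.List.pyGetD wl idx "")]) []
      = (PySem.List.pyRange 0 n 1).map
          (fun idx => if idx ≤ li then "" else PySem.Str.strip (PySem.List.pyGetD wl idx "")) := by
        simp only [hstep]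
        simpa using hpi_foldl_snoc
          (fun idx => if idx ≤ li then "" else PySem.Str.strip (PySem.List.pyGetD wl idx "")) _ []
    _ = List.replicate c.toNat "" ++ (wl.drop c.toNat).map PySem.Str.strip := by
        rw [hsplit, List.map_append]
        congr 1
        · have : ∀ idx ∈ PySem.List.pyRange 0 c 1,
              (if idx ≤ li then "" else PySem.Str.strip (PySem.List.pyGetD wl idx "")) = "" := by
            intro idx hidx
            rw [PySem.List.mem_pyRange_one] at hidx
            have : idx ≤ li := by simp only [hc] at hidx; omega
            simp [this]
          rw [List.map_congr_left this]
          simp [PySem.List.length_pyRange_one]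
        · have hmem : ∀ idx ∈ PySem.List.pyRange c n 1,
              (if idx ≤ li then "" else PySem.Str.strip (PySem.List.pyGetD wl idx "")) =
              PySem.Str.strip (PySem.List.pyGetD wl idx "") := by
            intro idx hidx
            rw [PySem.List.mem_pyRange_one] at hidx
            have : ¬ idx ≤ li := by simp only [hc, hn] at hidx ⊢; omega
            simp [this]
          rw [List.map_congr_left hmem]
          have := PySem.List.map_pyGetD_pyRange' (xs := wl) (a := c) (d := "") h0c
          rw [← hn] at this
          rw [← this, List.map_map]
          rfl

-- ===== VERDICT (by name: the statement is the Claim_ definition above) =====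
theorem header_point_idx_spec : Claim_equal_header_point_idx := by
  intro wl li _
  unfold Spec_header_point_idx header_point_idx_alt
  rw [hpiA_eq_mid, hpiGo_eq_mid]
  simp
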